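-- pv_equiv track=rewrite | github.com/rfoldhzi/Tussel_Online | tactics/game.py | findPatternPoints
-- ===== SOURCE A (Python) =====
-- def findStartSpot(pattern: tuple):
--     for y in range(len(pattern)):
--         for x in range(len(pattern[0])):
--             if pattern[y][x] == 'S':
--                 return x,y
--     return None
--
-- def findPatternPoints(pattern: tuple, pos:tuple):
--     startOffset = findStartSpot(pattern=pattern)
--     offsetX = pos[0]-startOffset[0]
--     offsetY = pos[1]-startOffset[1]
--
--     points = []
--     for y in range(len(pattern)):
--         for x in range(len(pattern[0])):
--             if pattern[y][x] == 'X':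
--                 points.append((x+offsetX,y+offsetY))
--
--     return points
-- ===== SOURCE B (Python) =====
-- def findPatternPoints(pattern: tuple, pos: tuple):
--     # One row-major gathering pass: remember the first 'S' and collect raw 'X'
--     # cells; afterwards translate the collected cells by the offset.
--     start = None
--     raw = []
--     for y, row in enumerate(pattern):
--         for x in range(len(pattern[0])):
--             c = row[x]
--             if c == 'S' and start is None:
--                 start = (x, y)
--             elif c == 'X':
--                 raw.append((x, y))
--     offsetX = pos[0] - start[0]
--     offsetY = pos[1] - start[1]
--     return [(x + offsetX, y + offsetY) for (x, y) in raw]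
-- ===== Notes on version B (the rewrite author's own statement) =====
-- stated objective: alternative
-- what changed: Replaces A's two separate full grid scans (findStartSpot pass plus a collection pass) by one gathering pass that records the first 'S' and the raw 'X' cells together, followed by a translation pass over only the collected points.
import Mathlib
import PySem

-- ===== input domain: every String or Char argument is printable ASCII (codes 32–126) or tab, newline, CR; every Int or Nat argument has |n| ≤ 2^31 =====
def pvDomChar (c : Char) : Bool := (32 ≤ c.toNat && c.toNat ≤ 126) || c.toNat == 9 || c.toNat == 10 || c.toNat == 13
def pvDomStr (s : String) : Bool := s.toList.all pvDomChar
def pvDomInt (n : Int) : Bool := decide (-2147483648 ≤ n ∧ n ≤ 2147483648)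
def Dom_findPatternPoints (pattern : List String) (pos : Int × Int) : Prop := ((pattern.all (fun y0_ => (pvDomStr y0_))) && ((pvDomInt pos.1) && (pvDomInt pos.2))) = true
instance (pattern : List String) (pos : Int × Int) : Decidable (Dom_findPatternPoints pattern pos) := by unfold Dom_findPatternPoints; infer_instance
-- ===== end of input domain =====

-- B replaces A's two full grid scans by one gathering pass (first 'S' + raw 'X' cells) plus a translation pass over the collected points; same cost, different decomposition.


-- ===== PORT A =====
-- cell tests: pattern[y][x] == 'S' / == 'X' (out-of-range pyGet? is none, so the test is false; Pre_ excludes those inputs, where Python raises IndexError)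
def pvIsS (r : String) (x : Nat) : Bool := PySem.Str.pyGet? r (x : Int) == some 'S'
def pvIsX (r : String) (x : Nat) : Bool := PySem.Str.pyGet? r (x : Int) == some 'X'

-- inner loop of findStartSpot: 'for x in range(w): if pattern[y][x] == "S": return x'
def pvRowS (r : String) (w : Nat) : Option Nat := (List.range w).find? (pvIsS r)

-- outer loop of findStartSpot, y the running row index
def pvFssAux (rows : List String) (w : Nat) (y : Int) : Option (Int × Int) :=
  match rows with
  | [] => none
  | r :: rest =>
    match pvRowS r w with
    | some x => some ((x : Int), y)
    | none => pvFssAux rest w (y + 1)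

def findStartSpot (pattern : List String) : Option (Int × Int) :=
  match pattern with
  | [] => none
  | r :: _ => pvFssAux pattern r.toList.length 0

def findPatternPoints (pattern : List String) (pos : Int × Int) : List (Int × Int) :=
  match findStartSpot pattern with
  | none => []  -- Python raises TypeError here; Pre_ excludes these inputs
  | some (sx, sy) =>
    let offsetX := pos.1 - sx
    let offsetY := pos.2 - sy
    let w := match pattern with | [] => 0 | r :: _ => r.toList.length
    (PySem.List.enumerate pattern).foldl
      (fun acc p =>
        (List.range w).foldl
          (fun acc x => if pvIsX p.2 x then acc ++ [((x : Int) + offsetX, p.1 + offsetY)] else acc)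
          acc)
      []

-- ===== PORT B =====
-- one cell of B's gathering pass: record the first 'S', append a raw 'X' cell
def pvStepB (y : Int) (r : String) (st : Option (Int × Int) × List (Int × Int)) (x : Nat) :
    Option (Int × Int) × List (Int × Int) :=
  if pvIsS r x && st.1.isNone then (some ((x : Int), y), st.2)
  else if pvIsX r x then (st.1, st.2 ++ [((x : Int), y)])
  else st

def findPatternPoints_alt (pattern : List String) (pos : Int × Int) : List (Int × Int) :=
  let w := match pattern with | [] => 0 | r :: _ => r.toList.length
  let st := (PySem.List.enumerate pattern).foldl
      (fun st p => (List.range w).foldl (pvStepB p.1 p.2) st)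
      ((none : Option (Int × Int)), ([] : List (Int × Int)))
  match st.1 with
  | none => []  -- Python raises TypeError here; Pre_ excludes these inputs
  | some (sx, sy) => st.2.map (fun q => (q.1 + (pos.1 - sx), q.2 + (pos.2 - sy)))

-- ===== PRECONDITION & SPEC =====
-- Pre_ excludes exactly the inputs where A raises: an empty pattern or no 'S' in the scanned
-- w-wide region (TypeError), and a row shorter than the first row (IndexError while scanning).
def Pre_findPatternPoints (pattern : List String) (pos : Int × Int) : Prop :=
  pattern ≠ [] ∧
  (∀ r ∈ pattern, (pattern.headD "").toList.length ≤ r.toList.length) ∧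
  (∃ r ∈ pattern, 'S' ∈ r.toList.take (pattern.headD "").toList.length)
instance (pattern : List String) (pos : Int × Int) : Decidable (Pre_findPatternPoints pattern pos) := by
  unfold Pre_findPatternPoints; infer_instance

def pvWitness_findPatternPoints : List String × (Int × Int) := (["S.", "XX"], (3, 4))

def Spec_findPatternPoints (pattern : List String) (pos : Int × Int) (out : List (Int × Int)) : Prop := out = findPatternPoints_alt pattern pos
instance (pattern : List String) (pos : Int × Int) (out : List (Int × Int)) : Decidable (Spec_findPatternPoints pattern pos out) := by unfold Spec_findPatternPoints; infer_instance

-- ===== CLAIM (what is proved, stated in full; the proofs are below) =====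
def Claim_equal_findPatternPoints : Prop := ∀ (pattern : List String) (pos : Int × Int), Dom_findPatternPoints pattern pos → Pre_findPatternPoints pattern pos → Spec_findPatternPoints pattern pos (findPatternPoints pattern pos)

-- ===== LEMMAS AND PROOFS =====

-- raw 'X' cells of one row, and of the whole grid, in scan order
def pvRowXs (r : String) (w : Nat) (y : Int) : List (Int × Int) :=
  ((List.range w).filter (pvIsX r)).map (fun x : Nat => ((x : Int), y))

def pvAllXs (rows : List String) (w : Nat) (y : Int) : List (Int × Int) :=
  (PySem.List.enumerate rows y).flatMap (fun p => pvRowXs p.2 w p.1)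

-- B's inner fold over one row splits into "first S" and "X cells appended"
theorem pvFoldB_row (r : String) (y : Int) (xs : List Nat) :
    ∀ st, xs.foldl (pvStepB y r) st =
      (st.1.or ((xs.find? (pvIsS r)).map (fun x : Nat => ((x : Int), y))),
       st.2 ++ (xs.filter (pvIsX r)).map (fun x : Nat => ((x : Int), y))) := by
  induction xs with
  | nil => intro st; simp
  | cons x xs ih =>
    intro st
    by_cases hS : pvIsS r x
    · have hX : pvIsX r x = false := by
        simp only [pvIsS, beq_iff_eq, PySem.Str.pyGet?_natCast] at hS
        simp [pvIsX, hS]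
      cases hst : st.1 with
      | none =>
        simp [List.foldl_cons, pvStepB, hS, hX, hst, ih]
      | some a =>
        simp [List.foldl_cons, pvStepB, hS, hX, hst, ih]
    · by_cases hX : pvIsX r x
      · simp [List.foldl_cons, pvStepB, hS, hX, ih]
      · simp [List.foldl_cons, pvStepB, hS, hX, ih]

-- B's outer fold equals (first 'S' in scan order, all raw 'X' cells)
theorem pvFoldB_all (w : Nat) (rows : List String) :
    ∀ (y : Int) st,
      (PySem.List.enumerate rows y).foldl (fun st p => (List.range w).foldl (pvStepB p.1 p.2) st) st
      = (st.1.or (pvFssAux rows w y), st.2 ++ pvAllXs rows w y) := by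
  induction rows with
  | nil => intro y st; simp [pvFssAux, pvAllXs, PySem.List.enumerate_nil]
  | cons r rest ih =>
    intro y st
    rw [PySem.List.enumerate_cons, List.foldl_cons, pvFoldB_row, ih]
    have hAll : pvAllXs (r :: rest) w y = pvRowXs r w y ++ pvAllXs rest w (y + 1) := by
      simp [pvAllXs, PySem.List.enumerate_cons]
    rw [hAll]
    refine Prod.ext ?_ ?_
    · show (st.1.or _).or _ = st.1.or (pvFssAux (r :: rest) w y)
      rw [Option.or_assoc]
      congr 1
      simp only [pvFssAux, pvRowS]
      cases (List.range w).find? (pvIsS r) <;> simp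
    · show st.2 ++ _ ++ _ = st.2 ++ (pvRowXs r w y ++ pvAllXs rest w (y + 1))
      simp [pvRowXs, List.append_assoc]

-- A's collection loop is the flatMap of translated row X-cells
theorem pvFoldA_all (w : Nat) (rows : List String) (ox oy : Int) (y : Int) (acc : List (Int × Int)) :
    (PySem.List.enumerate rows y).foldl
      (fun acc p =>
        (List.range w).foldl
          (fun acc x => if pvIsX p.2 x then acc ++ [((x : Int) + ox, p.1 + oy)] else acc) acc)
      acc
    = acc ++ (pvAllXs rows w y).map (fun q => (q.1 + ox, q.2 + oy)) := by
  have h1 : ∀ (p : Int × String) (a : List (Int × Int)),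
      (List.range w).foldl
        (fun acc x => if pvIsX p.2 x then acc ++ [((x : Int) + ox, p.1 + oy)] else acc) a
      = a ++ (pvRowXs p.2 w p.1).map (fun q => (q.1 + ox, q.2 + oy)) := by
    intro p a
    rw [PySem.List.foldl_append_if]
    simp only [pvRowXs, List.map_map]
    rfl
  calc (PySem.List.enumerate rows y).foldl _ acc
      = (PySem.List.enumerate rows y).foldl
          (fun a p => a ++ (pvRowXs p.2 w p.1).map (fun q => (q.1 + ox, q.2 + oy))) acc := by
        exact PySem.List.foldl_congr_mem _ _ _ _ (fun a p _ => h1 p a)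
    _ = acc ++ (PySem.List.enumerate rows y).flatMap
          (fun p => (pvRowXs p.2 w p.1).map (fun q => (q.1 + ox, q.2 + oy))) := by
        rw [PySem.List.foldl_append_eq_flatMap]
    _ = acc ++ (pvAllXs rows w y).map (fun q => (q.1 + ox, q.2 + oy)) := by
        simp [pvAllXs, List.map_flatMap]

-- ===== VERDICT (by name: the statement is the Claim_ definition above) =====
theorem findPatternPoints_spec : Claim_equal_findPatternPoints := by
  intro pattern pos _ _
  show findPatternPoints pattern pos = findPatternPoints_alt pattern pos
  cases pattern with
  | nil => rfl
  | cons r rest =>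
    simp only [findPatternPoints, findPatternPoints_alt, findStartSpot]
    rw [pvFoldB_all]
    simp only [Option.none_or, List.nil_append]
    cases h : pvFssAux (r :: rest) r.toList.length 0 with
    | none => rfl
    | some p =>
      obtain ⟨sx, sy⟩ := p
      dsimp only
      rw [pvFoldA_all]
      rfl
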